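-- pv_equiv track=rewrite | github.com/guillaumemichel/Project2-ML | preprocessing.py | removeDiamonds
-- ===== SOURCE A (Python) =====
-- def removeDiamonds(sentences):
--     """Remove the diamonds tags (i.e < url > and < user >) from the tweets"""
--
--     # creating the set of sentences without diamonds
--     newSentences = []
--     for sentence in sentences:
--         inDiamond=False
--         currentIndex=0
--         newSentence=""
--         for i in range(len(sentence)):
--             c = sentence[i]
--             if c == '<':
--                 newSentence += sentence[currentIndex:i]
--                 inDiamond = True
--                 currentIndex = i
--             if c == '>' and inDiamond:
--                 currentIndex = i+1
--                 inDiamond = False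
--         newSentence += sentence[currentIndex:len(sentence)]
--         newSentences.append(newSentence)
--     return newSentences
-- ===== SOURCE B (Python) =====
-- def removeDiamonds(sentences):
--     """Remove the diamonds tags (i.e < url > and < user >) from the tweets"""
--     newSentences = []
--     for sentence in sentences:
--         out = []
--         mark = None  # index in out of the most recent still-open '<'
--         for ch in sentence:
--             if ch == '<':
--                 out.append('<')
--                 mark = len(out) - 1
--             elif ch == '>' and mark is not None:
--                 del out[mark:]
--                 mark = None
--             else:
--                 out.append(ch)
--         newSentences.append(''.join(out))
--     return newSentences
-- ===== Notes on version B (the rewrite author's own statement) =====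
-- stated objective: simpler
-- what changed: B replaces A's index/slice bookkeeping (inDiamond flag, currentIndex, copying kept input slices) by a single output buffer with a mark of the last open '<': on '>' it truncates the buffer at the mark, so the kept text is maintained in the output rather than reconstructed from input slices.
import Mathlib
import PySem

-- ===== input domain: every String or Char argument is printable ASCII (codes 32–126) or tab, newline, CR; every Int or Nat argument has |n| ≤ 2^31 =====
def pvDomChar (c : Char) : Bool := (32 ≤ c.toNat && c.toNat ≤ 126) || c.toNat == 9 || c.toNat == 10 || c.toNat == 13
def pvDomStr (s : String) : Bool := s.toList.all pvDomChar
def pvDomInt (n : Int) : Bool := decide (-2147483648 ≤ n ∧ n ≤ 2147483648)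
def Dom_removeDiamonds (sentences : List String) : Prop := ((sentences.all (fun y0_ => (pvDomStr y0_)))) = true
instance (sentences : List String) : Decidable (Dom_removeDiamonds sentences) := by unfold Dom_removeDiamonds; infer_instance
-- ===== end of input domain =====

-- B replaces A's slice bookkeeping (flag + currentIndex + copied input slices) by an output
-- buffer truncated at the mark of the last open '<' (objective: simpler).

-- ===== PORT A =====
-- inner loop body: two successive ifs on sentence[i]; state (inDiamond, currentIndex, newSentence)
def pvStepA (cs : List Char) (st : Bool × Int × List Char) (i : Int) : Bool × Int × List Char :=
  let c := PySem.List.pyGetD cs i ' '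
  let st1 := if c = '<' then (true, i, st.2.2 ++ PySem.List.slice cs (some st.2.1) (some i)) else st
  if c = '>' ∧ st1.1 = true then (false, i + 1, st1.2.2) else st1

def pvProcA (cs : List Char) : List Char :=
  let st := (PySem.List.pyRange 0 (cs.length : Int) 1).foldl (pvStepA cs) (false, 0, [])
  st.2.2 ++ PySem.List.slice cs (some st.2.1) (some (cs.length : Int))

def removeDiamonds (sentences : List String) : List String :=
  sentences.foldl (fun ns s => ns ++ [String.ofList (pvProcA s.toList)]) []

-- ===== PORT B =====
-- state (out, mark): out is the output buffer, mark the index in out of the last open '<'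
def pvStepB (st : List Char × Option Nat) (ch : Char) : List Char × Option Nat :=
  if ch = '<' then (st.1 ++ ['<'], some st.1.length)
  else if ch = '>' then
    match st.2 with
    | some m => (st.1.take m, none)
    | none => (st.1 ++ [ch], none)
  else (st.1 ++ [ch], st.2)

def pvProcB (cs : List Char) : List Char := (cs.foldl pvStepB ([], none)).1

def removeDiamonds_alt (sentences : List String) : List String :=
  sentences.foldl (fun ns s => ns ++ [String.ofList (pvProcB s.toList)]) []

-- ===== PRECONDITION & SPEC =====
def Spec_removeDiamonds (sentences : List String) (out : List String) : Prop := out = removeDiamonds_alt sentences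
instance (sentences : List String) (out : List String) : Decidable (Spec_removeDiamonds sentences out) := by unfold Spec_removeDiamonds; infer_instance

-- ===== CLAIM (what is proved, stated in full; the proofs are below) =====
def Claim_equal_removeDiamonds : Prop := ∀ (sentences : List String), Dom_removeDiamonds sentences → Spec_removeDiamonds sentences (removeDiamonds sentences)

-- ===== LEMMAS AND PROOFS =====

-- loop invariant: after processing positions [0,k), A's (inD, cur, acc) and B's (out, mark)
-- satisfy out = acc ++ (cs.take k).drop cur and mark = some acc.length iff inD
lemma pvKey (cs : List Char) : ∀ (m k : Nat) (inD : Bool) (acc : List Char) (cur : Nat),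
    k + m = cs.length → cur ≤ k →
    (let st := (PySem.List.pyRange (k : Int) (cs.length : Int) 1).foldl (pvStepA cs) (inD, (cur : Int), acc)
     st.2.2 ++ PySem.List.slice cs (some st.2.1) (some (cs.length : Int)))
    = ((cs.drop k).foldl pvStepB (acc ++ (cs.take k).drop cur,
        if inD then some acc.length else none)).1 := by
  intro m
  induction m with
  | zero =>
    intro k inD acc cur hk hcur
    have hk' : k = cs.length := by omega
    subst hk'
    simp [PySem.List.pyRange, PySem.List.slice_natCast,
      List.take_of_length_le (le_refl cs.length)]
  | succ m ih =>
    intro k inD acc cur hk hcur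
    have hklt : k < cs.length := by omega
    have hcons : PySem.List.pyRange (k : Int) (cs.length : Int) 1
        = (k : Int) :: PySem.List.pyRange ((k : Int) + 1) (cs.length : Int) 1 :=
      PySem.List.pyRange_one_cons (by exact_mod_cast hklt)
    have hdrop : cs.drop k = cs[k] :: cs.drop (k + 1) := (List.getElem_cons_drop hklt).symm
    have hget : PySem.List.pyGetD cs (k : Int) ' ' = cs[k] := by
      rw [PySem.List.pyGetD_natCast, List.getD_eq_getElem cs ' ' hklt]
    have htake : cs.take (k + 1) = cs.take k ++ [cs[k]] := by
      rw [List.take_add_one, List.getElem?_eq_getElem hklt]; rfl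
    have hslice : PySem.List.slice cs (some (cur : Int)) (some (k : Int))
        = (cs.take k).drop cur := by
      rw [PySem.List.slice_natCast, List.drop_take]
    have hsplit : (cs.take (k + 1)).drop cur = (cs.take k).drop cur ++ [cs[k]] := by
      rw [htake, List.drop_append_of_le_length (by simp [List.length_take]; omega)]
    have hk1 : (cs.take (k + 1)).drop k = [cs[k]] := by
      rw [htake, List.drop_append_of_le_length (by simp [List.length_take]; omega)]
      simp [List.drop_take]
    have hcast : ((k : Nat) : Int) + 1 = (((k + 1 : Nat)) : Int) := by push_cast; ring
    rw [hcons, List.foldl_cons, hdrop, List.foldl_cons]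
    by_cases hlt : cs[k] = '<'
    · -- '<' : A flushes the kept slice and re-marks; B appends '<' and re-marks
      have hA : pvStepA cs (inD, (cur : Int), acc) (k : Int)
          = (true, (k : Int), acc ++ (cs.take k).drop cur) := by
        simp [pvStepA, hget, hlt, hslice]
      have hB : pvStepB (acc ++ (cs.take k).drop cur,
            if inD = true then some acc.length else none) cs[k]
          = (acc ++ (cs.take k).drop cur ++ ['<'],
             some (acc ++ (cs.take k).drop cur).length) := by
        simp [pvStepB, hlt]
      rw [hA, hB, hcast]
      have := ih (k + 1) true (acc ++ (cs.take k).drop cur) k (by omega) (by omega)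
      rw [this]
      simp [hk1, hlt]
    · by_cases hgt : cs[k] = '>'
      · cases inD with
        | true =>
          -- closing '>' : A jumps currentIndex past it; B truncates the buffer at the mark
          have hA : pvStepA cs (true, (cur : Int), acc) (k : Int)
              = (false, (k : Int) + 1, acc) := by
            simp [pvStepA, hget, hlt, hgt]
          have hB : pvStepB (acc ++ (cs.take k).drop cur,
                if true = true then some acc.length else none) cs[k]
              = (acc, none) := by
            simp [pvStepB, hlt, hgt, List.take_left]
          rw [hA, hB, hcast]
          have := ih (k + 1) false acc (k + 1) (by omega) (le_refl _)
          rw [this]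
          simp [List.drop_take]
        | false =>
          -- '>' with no open '<': both keep the character
          have hA : pvStepA cs (false, (cur : Int), acc) (k : Int)
              = (false, (cur : Int), acc) := by
            simp [pvStepA, hget, hlt, hgt]
          have hB : pvStepB (acc ++ (cs.take k).drop cur,
                if false = true then some acc.length else none) cs[k]
              = (acc ++ (cs.take k).drop cur ++ [cs[k]],
                 if false = true then some acc.length else none) := by
            simp [pvStepB, hlt, hgt]
          rw [hA, hB, hcast]
          have := ih (k + 1) false acc cur (by omega) (by omega)
          rw [this]
          simp [hsplit]
      · -- ordinary character: A keeps scanning; B appends it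
        have hA : pvStepA cs (inD, (cur : Int), acc) (k : Int)
            = (inD, (cur : Int), acc) := by
          simp [pvStepA, hget, hlt, hgt]
        have hB : pvStepB (acc ++ (cs.take k).drop cur,
              if inD = true then some acc.length else none) cs[k]
            = (acc ++ (cs.take k).drop cur ++ [cs[k]],
               if inD = true then some acc.length else none) := by
          cases inD <;> simp [pvStepB, hlt, hgt]
        rw [hA, hB, hcast]
        have := ih (k + 1) inD acc cur (by omega) (by omega)
        rw [this]
        simp [hsplit]

lemma pvProc_eq (cs : List Char) : pvProcA cs = pvProcB cs := by
  have := pvKey cs cs.length 0 false [] 0 (by omega) (le_refl 0)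
  simpa [pvProcA, pvProcB] using this

-- ===== VERDICT (by name: the statement is the Claim_ definition above) =====
theorem removeDiamonds_spec : Claim_equal_removeDiamonds := by
  intro sentences _
  unfold Spec_removeDiamonds removeDiamonds removeDiamonds_alt
  rw [PySem.List.foldl_append_singleton_eq_map, PySem.List.foldl_append_singleton_eq_map]
  simp [pvProc_eq]
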